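-- pv_equiv track=rewrite | github.com/Gyde04/race-condition-tool | race_condition_detector.py | _check_for_synchronization
-- ===== SOURCE A (Python) =====
-- from typing import List, Dict, Set, Tuple, Optional
--
-- def _check_for_synchronization(lines: List[str], line_num: int) -> bool:
--     """Check if there's proper synchronization."""
--     sync_keywords = ['lock', 'semaphore', 'barrier', 'event', 'condition']
--
--     start = max(0, line_num - 20)
--     end = min(len(lines), line_num + 20)
--
--     for i in range(start, end):
--         if any(keyword in lines[i].lower() for keyword in sync_keywords):
--             return True
--
--     return False
-- ===== SOURCE B (Python) =====
-- def _check_for_synchronization(lines, line_num):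
--     """Check if there's proper synchronization."""
--     sync_keywords = ['lock', 'semaphore', 'barrier', 'event', 'condition']
--
--     # index the keywords by first character once, then do a single
--     # position scan over each lowered line (multi-pattern matching)
--     by_first = {}
--     for kw in sync_keywords:
--         by_first.setdefault(kw[0], []).append(kw)
--
--     start = max(0, line_num - 20)
--     end = max(start, min(len(lines), line_num + 20))
--
--     for line in lines[start:end]:
--         text = line.lower()
--         for i, ch in enumerate(text):
--             for kw in by_first.get(ch, ()):
--                 if text[i:i + len(kw)] == kw:
--                     return True
--     return False
-- ===== Notes on version B (the rewrite author's own statement) =====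
-- stated objective: alternative
-- what changed: Instead of running the built-in substring search once per keyword per line, B indexes the keywords by first character in a dict built once and makes a single left-to-right position scan of each lowered window line, testing only the keywords whose first character matches the scanned character.
import Mathlib
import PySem

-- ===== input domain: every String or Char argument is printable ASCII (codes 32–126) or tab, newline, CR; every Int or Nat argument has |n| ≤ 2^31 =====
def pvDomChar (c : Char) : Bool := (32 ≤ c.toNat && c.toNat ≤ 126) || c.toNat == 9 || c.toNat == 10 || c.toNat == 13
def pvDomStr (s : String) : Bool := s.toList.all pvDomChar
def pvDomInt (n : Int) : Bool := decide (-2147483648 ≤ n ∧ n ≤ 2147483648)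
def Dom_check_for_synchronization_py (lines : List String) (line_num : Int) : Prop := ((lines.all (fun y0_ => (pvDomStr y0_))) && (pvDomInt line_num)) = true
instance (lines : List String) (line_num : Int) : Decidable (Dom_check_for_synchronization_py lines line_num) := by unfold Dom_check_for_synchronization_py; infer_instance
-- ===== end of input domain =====

-- B replaces A's per-line, per-keyword built-in substring search by a single left-to-right
-- position scan of each lowered window line against a dict index of the keywords keyed by
-- their first character (multi-pattern matching); objective: alternative, same asymptotics.

-- ===== PORT A =====
def syncKeywordsA : List String := ["lock", "semaphore", "barrier", "event", "condition"]

def check_for_synchronization_py (lines : List String) (line_num : Int) : Bool :=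
  let start := max 0 (line_num - 20)
  let stop := min (lines.length : Int) (line_num + 20)
  (PySem.List.pyRange start stop 1).any (fun i =>
    syncKeywordsA.any (fun kw => PySem.Str.isIn kw (PySem.Str.lower (PySem.List.pyGetD lines i ""))))

-- ===== PORT B =====
def syncKeywordsB : List String := ["lock", "semaphore", "barrier", "event", "condition"]

-- Source B's by_first: setdefault(kw[0], []).append(kw), i.e. Dict.modify with default [];
-- the one-character Python string keys kw[0] / ch are represented as Char (exact: code points)
def pvByFirst : PySem.Dict Char (List String) :=
  syncKeywordsB.foldl (fun d kw =>
    match kw.toList.head? with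
    | some c => PySem.Dict.modify d c [] (fun l => l ++ [kw])
    | none => d) PySem.Dict.empty

-- strings handled as their char lists (exact): text[i:i+len(kw)] == kw is the char-list
-- slice compared with kw's chars; enumerate(text) enumerates the chars
def check_for_synchronization_py_alt (lines : List String) (line_num : Int) : Bool :=
  let start := max 0 (line_num - 20)
  let stop := max start (min (lines.length : Int) (line_num + 20))
  (PySem.List.slice lines (some start) (some stop)).any (fun line =>
    let text := PySem.Chars.lower line.toList
    (PySem.List.enumerate text).any (fun p =>
      (PySem.Dict.getD pvByFirst p.2 []).any (fun kw =>
        PySem.List.slice text (some p.1) (some (p.1 + PySem.Str.len kw)) == kw.toList)))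

-- ===== PRECONDITION & SPEC =====
def Spec_check_for_synchronization_py (lines : List String) (line_num : Int) (out : Bool) : Prop := out = check_for_synchronization_py_alt lines line_num
instance (lines : List String) (line_num : Int) (out : Bool) : Decidable (Spec_check_for_synchronization_py lines line_num out) := by unfold Spec_check_for_synchronization_py; infer_instance

-- ===== CLAIM (what is proved, stated in full; the proofs are below) =====
def Claim_equal_check_for_synchronization_py : Prop := ∀ (lines : List String) (line_num : Int), Dom_check_for_synchronization_py lines line_num → Spec_check_for_synchronization_py lines line_num (check_for_synchronization_py lines line_num)

-- ===== LEMMAS AND PROOFS =====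

-- the in-range lookups along the index range are exactly the slice
lemma pv_map_range (xs : List String) (a b : Int) (h0 : 0 ≤ a) (hab : a ≤ b)
    (hb : b ≤ (xs.length : Int)) :
    (PySem.List.pyRange a b 1).map (fun j => PySem.List.pyGetD xs j "") =
      List.take (b.toNat - a.toNat) (List.drop a.toNat xs) := by
  have hlenx : PySem.List.len xs = (xs.length : Int) := by simp
  have h1 := PySem.List.map_pyGetD_pyRange xs "" h0
  rw [hlenx, PySem.List.pyRange_one_append a b (xs.length : Int) hab hb, List.map_append] at h1
  have hlen : ((PySem.List.pyRange a b 1).map (fun j => PySem.List.pyGetD xs j "")).length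
      = b.toNat - a.toNat := by
    rw [List.length_map, PySem.List.length_pyRange_one]; omega
  rw [← h1, ← hlen, List.take_left]

-- any over an index range with in-range lookups = any over the slice
lemma pv_range_any (xs : List String) (P : String → Bool) (a b : Int)
    (h0 : 0 ≤ a) (hb0 : 0 ≤ b) (hb : b ≤ (xs.length : Int)) :
    (PySem.List.pyRange a b 1).any (fun i => P (PySem.List.pyGetD xs i "")) =
      (PySem.List.slice xs (some a) (some b)).any P := by
  rw [PySem.List.slice_toNat xs h0 hb0]
  by_cases hba : b ≤ a
  · rw [PySem.List.pyRange_one_eq_nil hba]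
    have h : b.toNat - a.toNat = 0 := by omega
    rw [h]
    simp
  · rw [← pv_map_range xs a b h0 (by omega) hb, List.any_map]
    rfl

-- swap the order of two nested `any`s
lemma pv_any_swap {α β : Type} (xs : List α) (ys : List β) (Q : α → β → Bool) :
    xs.any (fun x => ys.any (fun y => Q x y)) = ys.any (fun y => xs.any (fun x => Q x y)) := by
  rw [Bool.eq_iff_iff]
  simp only [List.any_eq_true]
  constructor
  · rintro ⟨x, hx, y, hy, h⟩; exact ⟨y, hy, x, hx, h⟩
  · rintro ⟨y, hy, x, hx, h⟩; exact ⟨x, hx, y, hy, h⟩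

-- the first-character index holds exactly the keywords starting with that character
lemma pv_mem_byFirst (c : Char) (kw : String) :
    kw ∈ PySem.Dict.getD pvByFirst c [] ↔ kw ∈ syncKeywordsB ∧ kw.toList.head? = some c := by
  have hB : pvByFirst = PySem.Dict.mk [('l',["lock"]),('s',["semaphore"]),('b',["barrier"]),('e',["event"]),('c',["condition"])] := by decide
  rw [hB, PySem.Dict.getD_eq_get?_getD]
  simp only [PySem.Dict.get?_mk_cons, beq_iff_eq]
  by_cases h1 : 'l' = c
  case pos =>
    subst h1
    constructor
    · intro h; simp at h; subst h; decide
    · rintro ⟨hm, hh⟩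
      simp only [syncKeywordsB, List.mem_cons, List.not_mem_nil, or_false] at hm
      rcases hm with rfl | rfl | rfl | rfl | rfl <;> revert hh <;> decide
  rw [if_neg h1]
  by_cases h2 : 's' = c
  case pos =>
    subst h2
    constructor
    · intro h; simp at h; subst h; decide
    · rintro ⟨hm, hh⟩
      simp only [syncKeywordsB, List.mem_cons, List.not_mem_nil, or_false] at hm
      rcases hm with rfl | rfl | rfl | rfl | rfl <;> revert hh <;> decide
  rw [if_neg h2]
  by_cases h3 : 'b' = c
  case pos =>
    subst h3
    constructor
    · intro h; simp at h; subst h; decide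
    · rintro ⟨hm, hh⟩
      simp only [syncKeywordsB, List.mem_cons, List.not_mem_nil, or_false] at hm
      rcases hm with rfl | rfl | rfl | rfl | rfl <;> revert hh <;> decide
  rw [if_neg h3]
  by_cases h4 : 'e' = c
  case pos =>
    subst h4
    constructor
    · intro h; simp at h; subst h; decide
    · rintro ⟨hm, hh⟩
      simp only [syncKeywordsB, List.mem_cons, List.not_mem_nil, or_false] at hm
      rcases hm with rfl | rfl | rfl | rfl | rfl <;> revert hh <;> decide
  rw [if_neg h4]
  by_cases h5 : 'c' = c
  case pos =>
    subst h5
    constructor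
    · intro h; simp at h; subst h; decide
    · rintro ⟨hm, hh⟩
      simp only [syncKeywordsB, List.mem_cons, List.not_mem_nil, or_false] at hm
      rcases hm with rfl | rfl | rfl | rfl | rfl <;> revert hh <;> decide
  rw [if_neg h5]
  simp only [show (PySem.Dict.mk ([] : List (Char × List String))).get? c = none from rfl, Option.getD_none, List.not_mem_nil, false_iff]
  rintro ⟨hm, hh⟩
  simp only [syncKeywordsB, List.mem_cons, List.not_mem_nil, or_false] at hm
  rcases hm with rfl | rfl | rfl | rfl | rfl
  · exact h1 (Option.some.inj hh)
  · exact h2 (Option.some.inj hh)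
  · exact h3 (Option.some.inj hh)
  · exact h4 (Option.some.inj hh)
  · exact h5 (Option.some.inj hh)

-- a successful position match pins the keyword's first character to the scanned character
lemma pv_match_head (tl : List Char) (p : Int × Char) (hp : p ∈ PySem.List.enumerate tl)
    (kw : String) (hne : kw.toList ≠ [])
    (h : (PySem.List.slice tl (some p.1) (some (p.1 + PySem.Str.len kw)) == kw.toList) = true) :
    kw.toList.head? = some p.2 := by
  rw [PySem.List.mem_enumerate_iff] at hp
  obtain ⟨k, hk, rfl⟩ := hp
  simp only [zero_add] at h ⊢
  rw [PySem.Str.len_eq] at h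
  rw [PySem.List.slice_natCast_add, beq_iff_eq] at h
  have hpre : kw.toList <+: tl.drop k := h ▸ List.take_prefix _ _
  obtain ⟨a, rest, hcs⟩ : ∃ a rest, kw.toList = a :: rest := by
    cases hcs : kw.toList with
    | nil => exact absurd hcs hne
    | cons a rest => exact ⟨a, rest, rfl⟩
  rw [hcs] at hpre ⊢
  obtain ⟨t, ht⟩ := hpre
  have hhead : (tl.drop k).head? = some a := by rw [← ht]; rfl
  rw [List.head?_drop, List.getElem?_eq_getElem hk] at hhead
  simp only [Option.some.injEq] at hhead
  simp only [List.head?_cons, Option.some.injEq]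
  exact hhead.symm

-- a nonempty pattern is an infix iff it matches at some position of the scan
lemma pv_infix_iff (cs tl : List Char) (hne : cs ≠ []) :
    cs <:+: tl ↔ ∃ k, k < tl.length ∧ (tl.drop k).take cs.length = cs := by
  constructor
  · rintro ⟨s, t, rfl⟩
    refine ⟨s.length, ?_, ?_⟩
    · cases cs with
      | nil => exact absurd rfl hne
      | cons a r => simp only [List.length_append, List.length_cons]; omega
    · rw [List.append_assoc, List.drop_left, List.take_left]
  · rintro ⟨k, hk, h⟩
    have hpre : cs <+: tl.drop k := h ▸ List.take_prefix _ _
    exact hpre.isInfix.trans (List.drop_suffix k tl).isInfix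

-- per scanned position: the candidates from the first-character index suffice
lemma pv_dict_any (tl : List Char) (p : Int × Char) (hp : p ∈ PySem.List.enumerate tl) :
    (PySem.Dict.getD pvByFirst p.2 []).any (fun kw =>
        PySem.List.slice tl (some p.1) (some (p.1 + PySem.Str.len kw)) == kw.toList) =
      syncKeywordsB.any (fun kw =>
        PySem.List.slice tl (some p.1) (some (p.1 + PySem.Str.len kw)) == kw.toList) := by
  rw [Bool.eq_iff_iff]
  simp only [List.any_eq_true]
  constructor
  · rintro ⟨kw, hkw, h⟩
    exact ⟨kw, ((pv_mem_byFirst p.2 kw).mp hkw).1, h⟩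
  · rintro ⟨kw, hkw, h⟩
    have hne : kw.toList ≠ [] := by
      simp only [syncKeywordsB, List.mem_cons, List.not_mem_nil, or_false] at hkw
      rcases hkw with rfl | rfl | rfl | rfl | rfl <;> decide
    exact ⟨kw, (pv_mem_byFirst p.2 kw).mpr ⟨hkw, pv_match_head tl p hp kw hne h⟩, h⟩

-- a nonempty pattern occurs as a substring iff it matches at some scanned position
lemma pv_scan_isIn (tl : List Char) (kw : String) (hne : kw.toList ≠ []) :
    (PySem.List.enumerate tl).any (fun p =>
        PySem.List.slice tl (some p.1) (some (p.1 + PySem.Str.len kw)) == kw.toList) =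
      PySem.Chars.isIn kw.toList tl := by
  rw [PySem.List.enumerate_eq_map_pyRange (d := ' '), List.any_map]
  rw [Bool.eq_iff_iff, PySem.Chars.isIn_iff_infix, pv_infix_iff kw.toList tl hne]
  simp only [List.any_eq_true, Function.comp_apply]
  constructor
  · rintro ⟨j, hj, h⟩
    rw [PySem.List.mem_pyRange_one] at hj
    obtain ⟨k, rfl⟩ : ∃ k : Nat, j = (k : Int) := ⟨j.toNat, by omega⟩
    rw [PySem.Str.len_eq, PySem.List.slice_natCast_add, beq_iff_eq] at h
    refine ⟨k, ?_, h⟩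
    have : (k : Int) < PySem.List.len tl := hj.2
    simp only [PySem.List.len_eq] at this
    exact_mod_cast this
  · rintro ⟨k, hk, h⟩
    refine ⟨(k : Int), ?_, ?_⟩
    · rw [PySem.List.mem_pyRange_one]
      constructor
      · exact_mod_cast Nat.zero_le k
      · simp only [PySem.List.len_eq]; exact_mod_cast hk
    · rw [PySem.Str.len_eq, PySem.List.slice_natCast_add, beq_iff_eq]
      exact h

-- per line: A's keyword-by-keyword membership = B's single position scan
lemma pv_line (line : String) :
    syncKeywordsB.any (fun kw => PySem.Str.isIn kw (PySem.Str.lower line)) =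
      ((PySem.List.enumerate (PySem.Chars.lower line.toList)).any (fun p =>
        (PySem.Dict.getD pvByFirst p.2 []).any (fun kw =>
          PySem.List.slice (PySem.Chars.lower line.toList) (some p.1)
            (some (p.1 + PySem.Str.len kw)) == kw.toList))) := by
  set tl := PySem.Chars.lower line.toList with htl
  rw [PySem.List.any_congr_mem (fun p hp => pv_dict_any tl p hp)]
  rw [pv_any_swap]
  apply PySem.List.any_congr_mem
  intro kw hkw
  have hne : kw.toList ≠ [] := by
    simp only [syncKeywordsB, List.mem_cons, List.not_mem_nil, or_false] at hkw
    rcases hkw with rfl | rfl | rfl | rfl | rfl <;> decide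
  rw [pv_scan_isIn tl kw hne]
  rw [Bool.eq_iff_iff, PySem.Str.isIn_iff_infix, PySem.Chars.isIn_iff_infix, PySem.Str.toList_lower]

lemma pv_main (lines : List String) (line_num : Int) :
    check_for_synchronization_py lines line_num = check_for_synchronization_py_alt lines line_num := by
  unfold check_for_synchronization_py check_for_synchronization_py_alt
  dsimp only
  set a := max 0 (line_num - 20) with ha
  set b0 := min (lines.length : Int) (line_num + 20) with hb0def
  have h0a : 0 ≤ a := le_max_left _ _
  have hb0len : b0 ≤ (lines.length : Int) := min_le_left _ _
  by_cases hba : b0 ≤ a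
  · rw [max_eq_left hba, PySem.List.pyRange_one_eq_nil hba]
    have hsl : PySem.List.slice lines (some a) (some a) = [] := by
      rw [← List.length_eq_zero_iff, PySem.List.length_slice]
      omega
    rw [hsl]
    rfl
  · rw [max_eq_right (by omega)]
    rw [pv_range_any lines
        (fun line => syncKeywordsA.any fun kw => PySem.Str.isIn kw (PySem.Str.lower line))
        a b0 h0a (by omega) hb0len]
    apply PySem.List.any_congr_mem
    intro line _
    exact pv_line line

-- ===== VERDICT (by name: the statement is the Claim_ definition above) =====
theorem check_for_synchronization_py_spec : Claim_equal_check_for_synchronization_py := by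
  intro lines line_num _
  unfold Spec_check_for_synchronization_py
  exact pv_main lines line_num
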